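-- pv_equiv track=rewrite | github.com/gruns/icecream | test_bug.py | data_reverse
-- ===== SOURCE A (Python) =====
-- def data_reverse(data):
--     bb = []
--     for b in range(0, len(data), 8):
--         bb.append(data[b : b + 8])
--
--     left = 0
--     right = len(bb) - 1
--
--     while right >= left:
--         bb[left], bb[right] = bb[right], bb[left]
--         left += 1
--         right -= 1
--
--     return [el for b in bb for el in b]
-- ===== SOURCE B (Python) =====
-- def data_reverse(data):
--     out = []
--     for b in reversed(range(0, len(data), 8)):
--         out.extend(data[b : b + 8])
--     return out
-- ===== Notes on version B (the rewrite author's own statement) =====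
-- stated objective: simpler
-- what changed: B iterates the chunk start indices in reverse order and extends one output list directly, eliminating A's intermediate chunk list and its in-place two-pointer swap loop.
import Mathlib
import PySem

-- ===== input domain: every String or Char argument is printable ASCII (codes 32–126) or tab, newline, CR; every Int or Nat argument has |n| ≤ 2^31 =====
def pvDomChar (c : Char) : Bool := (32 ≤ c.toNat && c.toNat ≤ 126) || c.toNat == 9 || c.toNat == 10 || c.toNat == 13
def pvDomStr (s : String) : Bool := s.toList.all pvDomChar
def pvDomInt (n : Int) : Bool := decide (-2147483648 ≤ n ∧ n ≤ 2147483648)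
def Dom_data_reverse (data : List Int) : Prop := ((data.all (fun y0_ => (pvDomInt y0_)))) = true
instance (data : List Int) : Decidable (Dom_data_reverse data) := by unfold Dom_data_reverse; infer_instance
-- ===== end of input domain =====

-- B iterates the chunk start indices in reverse and extends one output list directly, instead of
-- A's build-chunk-list / two-pointer swap / flatten pipeline (same O(n) cost, simpler).

-- ===== PORT A =====
-- 'while right >= left: bb[left], bb[right] = bb[right], bb[left]; left += 1; right -= 1'.
-- pyGet? is total (none = IndexError); its 'none' branch only makes the function total and is
-- unreachable for the indices data_reverse passes (0 ≤ left ≤ right < len bb).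
def swapLoopA (bb : List (List Int)) (left right : Int) : List (List Int) :=
  if _h : right ≥ left then
    match PySem.List.pyGet? bb left, PySem.List.pyGet? bb right with
    | some vl, some vr =>
        swapLoopA ((bb.set left.toNat vr).set right.toNat vl) (left + 1) (right - 1)
    | _, _ => bb
  else bb
termination_by (right + 1 - left).toNat
decreasing_by omega

def data_reverse (data : List Int) : List Int :=
  -- for b in range(0, len(data), 8): bb.append(data[b:b+8])
  let bb := (PySem.List.pyRange 0 data.length 8).foldl
      (fun acc b => acc ++ [PySem.List.slice data (some b) (some (b + 8))]) []
  -- the swap loop, then the comprehension [el for b in bb for el in b]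
  (swapLoopA bb 0 (bb.length - 1)).flatMap id

-- ===== PORT B =====
def data_reverse_alt (data : List Int) : List Int :=
  -- for b in reversed(range(0, len(data), 8)): out.extend(data[b:b+8])
  (PySem.List.pyRange 0 data.length 8).reverse.foldl
      (fun out b => out ++ PySem.List.slice data (some b) (some (b + 8))) []

-- ===== PRECONDITION & SPEC =====
def Spec_data_reverse (data : List Int) (out : List Int) : Prop := out = data_reverse_alt data
instance (data : List Int) (out : List Int) : Decidable (Spec_data_reverse data out) := by unfold Spec_data_reverse; infer_instance

-- ===== CLAIM (what is proved, stated in full; the proofs are below) =====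
def Claim_equal_data_reverse : Prop := ∀ (data : List Int), Dom_data_reverse data → Spec_data_reverse data (data_reverse data)

-- ===== LEMMAS AND PROOFS =====

-- A's two-pointer loop reverses the segment it is started on and leaves the rest unchanged.
theorem swapLoopA_reverse (mid : List (List Int)) : ∀ (pre post : List (List Int)),
    swapLoopA (pre ++ mid ++ post) pre.length (pre.length + mid.length - 1)
      = pre ++ mid.reverse ++ post := by
  induction mid using List.bidirectionalRec with
  | nil =>
    intro pre post
    rw [swapLoopA]
    simp
  | singleton x =>
    intro pre post
    have hsh : pre ++ [x] ++ post = pre ++ x :: post := by simp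
    rw [hsh, swapLoopA]
    have harith : (pre.length : Int) + ([x].length : Nat) - 1 = (pre.length : Int) := by
      simp
    rw [harith, PySem.List.pyGet?_append_length]
    simp only [ge_iff_le, le_refl, dite_true]
    have hset : ((pre ++ x :: post).set ((pre.length : Int)).toNat x).set
        ((pre.length : Int)).toNat x = pre ++ x :: post := by
      rw [List.set_set, Int.toNat_natCast, List.set_append_right _ _ (le_refl _)]
      simp
    rw [hset, swapLoopA]
    simp
  | cons_append x mid y ih =>
    intro pre post
    have hsh : pre ++ x :: (mid ++ [y]) ++ post = pre ++ x :: (mid ++ y :: post) := by simp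
    rw [hsh, swapLoopA, PySem.List.pyGet?_append_length]
    have harith : (pre.length : Int) + ((x :: (mid ++ [y])).length : Nat) - 1
        = (((pre ++ x :: mid).length : Nat) : Int) := by
      simp; omega
    rw [harith]
    have hsh2 : pre ++ x :: (mid ++ y :: post) = (pre ++ x :: mid) ++ y :: post := by simp
    rw [hsh2, PySem.List.pyGet?_append_length]
    have hge : (((pre ++ x :: mid).length : Nat) : Int) ≥ (pre.length : Int) := by
      simp; omega
    simp only [ge_iff_le, hge, dite_true]
    have hsets : (((pre ++ x :: mid) ++ y :: post).set ((pre.length : Int)).toNat y).set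
          ((((pre ++ x :: mid).length : Nat) : Int)).toNat x
        = (pre ++ [y]) ++ mid ++ ([x] ++ post) := by
      have h1 : ((pre ++ x :: mid) ++ y :: post).set ((pre.length : Int)).toNat y
          = (pre ++ y :: mid) ++ y :: post := by
        rw [Int.toNat_natCast, List.append_assoc, List.set_append_right _ _ (le_refl _)]
        simp
      rw [h1, Int.toNat_natCast]
      have hlen : (pre ++ x :: mid).length = (pre ++ y :: mid).length := by simp
      rw [hlen, List.set_append_right _ _ (le_refl _)]
      simp
    rw [hsets]
    have e1 : (pre.length : Int) + 1 = (((pre ++ [y]).length : Nat) : Int) := by simp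
    have e2 : (((pre ++ x :: mid).length : Nat) : Int) - 1
        = (((pre ++ [y]).length : Nat) : Int) + (mid.length : Nat) - 1 := by
      simp; omega
    rw [e1, e2, ih (pre ++ [y]) ([x] ++ post)]
    simp

-- ===== VERDICT (by name: the statement is the Claim_ definition above) =====
theorem data_reverse_spec : Claim_equal_data_reverse := by
  intro data _
  unfold Spec_data_reverse data_reverse data_reverse_alt
  simp only [PySem.List.foldl_append_singleton_eq_map, List.nil_append]
  set starts := PySem.List.pyRange 0 (data.length : Int) 8 with hs
  set chunk := fun b => PySem.List.slice data (some b) (some (b + 8)) with hc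
  have hswap : swapLoopA (starts.map chunk) 0 (((starts.map chunk).length : Nat) - 1)
      = (starts.map chunk).reverse := by
    simpa using swapLoopA_reverse (starts.map chunk) [] []
  rw [PySem.List.foldl_append_eq_flatMap, hswap]
  simp [← List.map_reverse, List.flatMap_map, hc]
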